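-- pv_equiv track=rewrite | github.com/MathoVerse100/Statistics-and-Machine-Learning-PROJECTS | Temp/Custom Permuter.py | permuter
-- ===== SOURCE A (Python) =====
-- def permuter(array):
--     length = len(array)
--     permutations = []
--     for i in range(length**length):
--         permutation = [0] * length
--         for j in range(length):
--             permutation[j] = array[(i // length**j) % length]
--         permutations.append(permutation)
--
--     return permutations
-- ===== SOURCE B (Python) =====
-- def permuter(array):
--     # Iterative cartesian product with repetition (len(array) rounds),
--     # appending the new most-significant position at the end so that
--     # position 0 varies fastest, exactly like A's mixed-radix counter.
--     prods = [[]]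
--     for _ in array:
--         prods = [p + [x] for x in array for p in prods]
--     return prods
-- ===== Notes on version B (the rewrite author's own statement) =====
-- stated objective: alternative
-- what changed: Replaced the n^n-iteration counter with per-element mixed-radix digit arithmetic (i // n**j % n) by an iterative cartesian-product construction that extends every partial tuple by each element of the array, one position per round.
import Mathlib
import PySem

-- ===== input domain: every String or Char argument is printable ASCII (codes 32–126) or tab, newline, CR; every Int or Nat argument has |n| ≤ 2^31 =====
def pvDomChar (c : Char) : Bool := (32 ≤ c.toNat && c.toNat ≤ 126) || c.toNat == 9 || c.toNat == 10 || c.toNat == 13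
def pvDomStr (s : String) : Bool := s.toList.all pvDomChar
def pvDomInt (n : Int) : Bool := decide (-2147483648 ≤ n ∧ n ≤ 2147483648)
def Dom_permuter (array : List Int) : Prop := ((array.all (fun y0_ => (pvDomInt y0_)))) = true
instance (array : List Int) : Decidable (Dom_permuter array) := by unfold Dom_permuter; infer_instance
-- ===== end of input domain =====

-- B replaces A's n^n counter with mixed-radix digit arithmetic by an iterative
-- cartesian-product construction (objective: alternative, same output order).

-- ===== PORT A =====
-- literal port of A; Python 'length ** e' on nonnegative ints is Int pow via .toNat
def permuter (array : List Int) : List (List Int) :=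
  let length : Int := (array.length : Int)
  (PySem.List.pyRange 0 (length ^ length.toNat) 1).foldl (fun permutations i =>
    let permutation : List Int := List.replicate array.length 0
    let permutation :=
      (PySem.List.pyRange 0 length 1).foldl (fun permutation j =>
        PySem.List.pySetD permutation j
          (PySem.List.pyGetD array
            (PySem.Int.mod (PySem.Int.floordiv i (length ^ j.toNat)) length) 0)) permutation
    permutations ++ [permutation]) []

-- ===== PORT B =====
def permuter_alt (array : List Int) : List (List Int) :=
  array.foldl
    (fun prods _ => array.flatMap (fun x => prods.map (fun p => p ++ [x])))
    [[]]

-- ===== PRECONDITION & SPEC =====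
def Spec_permuter (array : List Int) (out : List (List Int)) : Prop := out = permuter_alt array
instance (array : List Int) (out : List (List Int)) : Decidable (Spec_permuter array out) := by unfold Spec_permuter; infer_instance

-- ===== CLAIM (what is proved, stated in full; the proofs are below) =====
def Claim_equal_permuter : Prop := ∀ (array : List Int), Dom_permuter array → Spec_permuter array (permuter array)

-- ===== LEMMAS AND PROOFS =====

-- the common specification: entry j of row i is array[(i / n^j) % n]
def pvRow (array : List Int) (m i : Nat) : List Int :=
  (List.range m).map (fun j => array.getD ((i / array.length ^ j) % array.length) 0)

def pvSpec (array : List Int) : Nat → List (List Int)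
  | 0 => [[]]
  | m + 1 => array.flatMap (fun x => (pvSpec array m).map (fun p => p ++ [x]))

-- B side: the foldl ignores the element, so it is just m rounds of the step
lemma b_eq_spec (array : List Int) (l : List Int) (acc : List (List Int)) :
    l.foldl (fun prods _ => array.flatMap (fun x => prods.map (fun p => p ++ [x]))) acc
      = Nat.rec acc (fun _ prods => array.flatMap (fun x => prods.map (fun p => p ++ [x]))) l.length := by
  induction l generalizing acc with
  | nil => rfl
  | cons y l ih =>
      simp only [List.foldl_cons, ih, List.length_cons]
      induction l.length with
      | zero => rfl
      | succ k ihk => simp only [ihk]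

lemma flatMap_eq_range_getD {β : Type} (l : List Int) (h : Int → List β) :
    l.flatMap h = (List.range l.length).flatMap (fun k => h (l.getD k 0)) := by
  induction l with
  | nil => rfl
  | cons x l ih =>
      simp [List.length_cons, List.range_succ_eq_map, List.flatMap_cons, ih,
        List.flatMap_map]

lemma range_mul_map {β : Type} (c a : Nat) (g : Nat → β) :
    (List.range (c * a)).map g
      = (List.range c).flatMap (fun k => (List.range a).map (fun r => g (k * a + r))) := by
  induction c with
  | zero => simp
  | succ c ih =>
      rw [Nat.succ_mul, List.range_add, List.map_append, ih, List.range_succ,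
        List.flatMap_append]
      simp [List.map_map, Function.comp]

-- digit arithmetic: the extra high digit does not disturb the low digits
lemma digit_low (n m j k r : Nat) (hj : j < m) :
    (k * n ^ m + r) / n ^ j % n = r / n ^ j % n := by
  rcases Nat.eq_zero_or_pos n with h0 | hn
  · subst h0; rw [Nat.zero_pow (by omega : 0 < m)]; simp
  · have h1 : k * n ^ m = (k * n ^ (m - j - 1) * n) * n ^ j := by
      rw [mul_assoc, mul_assoc, ← Nat.pow_succ', ← Nat.pow_add]
      congr 2
      omega
    rw [h1, Nat.add_comm, Nat.add_mul_div_right _ _ (Nat.pow_pos hn),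
      Nat.add_mul_mod_self_right]

lemma digit_high (n m k r : Nat) (hn : 0 < n) (hk : k < n) (hr : r < n ^ m) :
    (k * n ^ m + r) / n ^ m % n = k := by
  rw [Nat.add_comm, Nat.add_mul_div_right _ _ (Nat.pow_pos hn),
    Nat.div_eq_of_lt hr, Nat.zero_add, Nat.mod_eq_of_lt hk]

lemma row_split (array : List Int) (m k r : Nat) (hn : 0 < array.length)
    (hk : k < array.length) (hr : r < array.length ^ m) :
    pvRow array (m + 1) (k * array.length ^ m + r)
      = pvRow array m r ++ [array.getD k 0] := by
  unfold pvRow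
  rw [List.range_succ, List.map_append]
  congr 1
  · exact List.map_congr_left (fun j hj =>
      by rw [digit_low _ _ _ _ _ (List.mem_range.mp hj)])
  · simp [digit_high _ _ _ _ hn hk hr]

lemma a_rows_eq_spec (array : List Int) (hn : 0 < array.length) (m : Nat) :
    (List.range (array.length ^ m)).map (pvRow array m) = pvSpec array m := by
  induction m with
  | zero => simp [pvRow, pvSpec]
  | succ m ih =>
      rw [pvSpec, flatMap_eq_range_getD, pow_succ', range_mul_map]
      apply List.flatMap_congr
      intro k hk
      rw [← ih, List.map_map]
      apply List.map_congr_left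
      intro r hr
      exact row_split array m k r hn (List.mem_range.mp hk) (List.mem_range.mp hr)

-- inner loop of A: filling the j-th slot for j in range(n) turns the buffer into the row
lemma inner_fill (array : List Int) (i : Int) (m : Nat) (p : List Int)
    (hm : m ≤ p.length) :
    (PySem.List.pyRange 0 (m : Int) 1).foldl
        (fun permutation j =>
          PySem.List.pySetD permutation j
            (PySem.List.pyGetD array
              (PySem.Int.mod (PySem.Int.floordiv i (((array.length : Int)) ^ j.toNat))
                (array.length : Int)) 0)) p
      = (List.range m).map (fun j =>
            PySem.List.pyGetD array
              (PySem.Int.mod (PySem.Int.floordiv i (((array.length : Int)) ^ j))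
                (array.length : Int)) 0) ++ p.drop m := by
  induction m with
  | zero => simp [PySem.List.pyRange_one_eq_nil]
  | succ m ih =>
      have hcast : ((m + 1 : Nat) : Int) = (m : Int) + 1 := by push_cast; ring
      rw [hcast, PySem.List.pyRange_one_succ_right (by positivity), List.foldl_append]
      rw [ih (by omega)]
      simp only [List.foldl_cons, List.foldl_nil, PySem.List.pySetD_natCast,
        Int.toNat_natCast]
      have hm : m < p.length := by omega
      rw [List.drop_eq_getElem_cons hm, List.range_succ, List.map_append]
      rw [List.set_append_right _ _ (by simp)]
      simp only [List.length_map, List.length_range, Nat.sub_self, List.set_cons_zero]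
      simp

lemma a_eq_rows (array : List Int) :
    permuter array = (List.range (array.length ^ array.length)).map (pvRow array array.length) := by
  unfold permuter
  rw [PySem.List.foldl_append_singleton_eq_map, List.nil_append]
  have hb : ((array.length : Int)) ^ ((array.length : Int)).toNat
      = ((array.length ^ array.length : Nat) : Int) := by
    rw [Int.toNat_natCast]; push_cast; ring
  rw [hb, PySem.List.pyRange_zero_natCast (array.length ^ array.length), List.map_map]
  apply List.map_congr_left
  intro k hk
  simp only [Function.comp_apply]
  rw [inner_fill array (k : Int) array.length (List.replicate array.length 0)
    (by simp)]
  simp only [List.drop_replicate, Nat.sub_self, List.replicate_zero, List.append_nil]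
  unfold pvRow
  apply List.map_congr_left
  intro j hj
  have h1 : ((array.length : Int)) ^ j = ((array.length ^ j : Nat) : Int) := by push_cast; ring
  rw [h1, PySem.Int.floordiv_natCast, PySem.Int.mod_natCast, PySem.List.pyGetD_natCast]

-- ===== VERDICT (by name: the statement is the Claim_ definition above) =====
theorem permuter_spec : Claim_equal_permuter := by
  intro array _
  unfold Spec_permuter
  rcases Nat.eq_zero_or_pos array.length with h0 | hn
  · rw [List.length_eq_zero_iff] at h0; subst h0; decide
  · have hb := b_eq_spec array array [[]]
    have : permuter_alt array = pvSpec array array.length := by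
      rw [permuter_alt, hb]
      generalize array.length = m
      induction m with
      | zero => rfl
      | succ k ih => simp only [pvSpec, ih]
    rw [this, a_eq_rows, a_rows_eq_spec array hn]
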